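-- pv_equiv track=rewrite | github.com/2021-Dev-Study/Algorithm | Baekjoon/정렬/10816_숫자 카드 2/red-Pen9uin.py | solution
-- ===== SOURCE A (Python) =====
-- def solution(cnt_sang, card_sang, cnt_many, how_many):
--     card_sang.sort()
--
--     # 이분탐색을 이용한 코드
--
--     # get_cards = [0] * cnt_many
--
--     # for i in range(cnt_many):
--     #     left = 0
--     #     right = cnt_sang-1
--
--     #     while left<=right:
--     #         mid = (left+right)//2
--     #         if card_sang[mid] == how_many[i]:
--     #             # 같은 값을 갖는지 뒤로 체크
--     #             tmp = mid
--     #             while tmp < cnt_sang and card_sang[tmp] == how_many[i]: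
--     #                 get_cards[i] += 1
--     #                 tmp += 1
--     #             # 같은 값을 갖는지 앞으로로 체크
--     #             tmp = mid-1
--     #             while tmp >= 0 and card_sang[tmp] == how_many[i]:
--     #                 get_cards[i] += 1
--     #                 tmp -= 1
--     #             break
--     #         elif card_sang[mid]>how_many[i]:
--     #             right = mid-1
--     #         else :
--     #             left = mid+1
--
--     many_cards = set(card_sang)
--     card_sang_cnt = {cards : 0 for cards in many_cards}
--
--     for i in card_sang:
--         try :
--             card_sang_cnt[i] += 1
--         except:
--             pass
--
--     get_cards = [0] * cnt_many
--     j = 0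
--
--     for i in how_many:
--         card = card_sang_cnt.get(i)
--         if card:
--             get_cards[j] = card
--         else:
--             pass
--         j += 1
--
--
--     return get_cards
-- ===== SOURCE B (Python) =====
-- def solution(cnt_sang, card_sang, cnt_many, how_many):
--     # Counts each query by binary search on the sorted card list
--     # (bisect_right - bisect_left) instead of building a dict counter.
--     # Like A, it sorts card_sang in place and fills a [0]*cnt_many output
--     # list by index, writing only nonzero counts.
--     card_sang.sort()
--
--     def bisect_left(a, x):
--         lo, hi = 0, len(a)
--         while lo < hi:
--             mid = (lo + hi) // 2
--             if a[mid] < x: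
--                 lo = mid + 1
--             else:
--                 hi = mid
--         return lo
--
--     def bisect_right(a, x):
--         lo, hi = 0, len(a)
--         while lo < hi:
--             mid = (lo + hi) // 2
--             if x < a[mid]:
--                 hi = mid
--             else:
--                 lo = mid + 1
--         return lo
--
--     get_cards = [0] * cnt_many
--     for j, v in enumerate(how_many):
--         cnt = bisect_right(card_sang, v) - bisect_left(card_sang, v)
--         if cnt:
--             get_cards[j] = cnt
--     return get_cards
-- ===== Notes on version B (the rewrite author's own statement) =====
-- stated objective: idiomatic
-- what changed: B replaces A's set-then-dict counting pass with binary search on the sorted card list (bisect_right - bisect_left per query), keeping the in-place sort and the indexed output-assignment loop.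
import Mathlib
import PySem

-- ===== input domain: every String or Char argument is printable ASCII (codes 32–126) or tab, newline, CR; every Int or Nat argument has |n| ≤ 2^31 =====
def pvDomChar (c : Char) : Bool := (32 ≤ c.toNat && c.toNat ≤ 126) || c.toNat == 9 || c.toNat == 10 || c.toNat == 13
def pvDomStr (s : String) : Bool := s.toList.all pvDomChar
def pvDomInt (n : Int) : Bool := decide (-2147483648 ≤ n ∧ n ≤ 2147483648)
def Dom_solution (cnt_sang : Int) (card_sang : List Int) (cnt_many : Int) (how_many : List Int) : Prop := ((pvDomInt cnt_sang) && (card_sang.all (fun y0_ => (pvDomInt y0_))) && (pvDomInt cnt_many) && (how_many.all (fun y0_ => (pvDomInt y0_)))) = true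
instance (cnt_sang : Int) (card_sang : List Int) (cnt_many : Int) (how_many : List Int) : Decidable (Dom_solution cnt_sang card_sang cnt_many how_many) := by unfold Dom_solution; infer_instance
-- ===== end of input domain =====

-- B replaces A's set+dict counting pass with binary search (bisect_right - bisect_left)
-- on the sorted card list, keeping A's in-place sort and its indexed output-assignment
-- loop; equivalence is about the return value (both sort card_sang in place).


-- ===== PORT A =====
-- card_sang.sort(); many_cards = set(card_sang); card_sang_cnt = {cards: 0 for cards in many_cards};
-- for i in card_sang: try: card_sang_cnt[i] += 1 except: pass
-- get_cards = [0]*cnt_many; j = 0; for i in how_many: card = card_sang_cnt.get(i); if card: get_cards[j] = card; j += 1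
-- (the dict comprehension iterates the set only to build a dict that is later only looked up: order-insensitive)
-- (list assignment get_cards[j] = card is ported as List.set; out-of-range j raises IndexError in Python — excluded by Pre_)
def solution (cnt_sang : Int) (card_sang : List Int) (cnt_many : Int) (how_many : List Int) : List Int :=
  let s := PySem.List.sorted card_sang (fun x => x) false
  let many_cards : PySem.Set Int := PySem.Set.ofList s
  let card_sang_cnt : PySem.Dict Int Int :=
    many_cards.foldl (fun d cards => d.insert cards 0) (PySem.Dict.empty : PySem.Dict Int Int)
  let d := s.foldl (fun d i =>
    match d.get? i with
    | some c => d.insert i (c + 1)   -- card_sang_cnt[i] += 1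
    | none => d)                     -- except: pass
    card_sang_cnt
  let get0 : List Int := List.replicate cnt_many.toNat 0
  (how_many.foldl (fun (gj : List Int × Nat) i =>
      match d.get? i with
      | some card => (if card ≠ 0 then gj.1.set gj.2 card else gj.1, gj.2 + 1)
      | none => (gj.1, gj.2 + 1))
    (get0, 0)).1

-- ===== PORT B =====
-- card_sang.sort(); the hand-written bisect_left/bisect_right lo/hi halving loops of Source B
-- are ported as the prelude's PySem.List.bisectLeft / bisectRight, which are step for step
-- the same loop; get_cards = [0]*cnt_many; for j, v in enumerate(how_many): cnt = br - bl;
-- if cnt: get_cards[j] = cnt  (same List.set port of the assignment as in A)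
def solution_alt (cnt_sang : Int) (card_sang : List Int) (cnt_many : Int) (how_many : List Int) : List Int :=
  let s := PySem.List.sorted card_sang (fun x => x) false
  let get0 : List Int := List.replicate cnt_many.toNat 0
  (PySem.List.enumerate how_many 0).foldl (fun g jv =>
      let cnt : Int := (PySem.List.bisectRight s jv.2 : Int) - (PySem.List.bisectLeft s jv.2 : Int)
      if cnt ≠ 0 then g.set jv.1.toNat cnt else g)
    get0

-- ===== PRECONDITION & SPEC =====
-- Pre_ excludes exactly the inputs on which Python A raises IndexError: a query value that is
-- present among the cards but sits at a position j with j ≥ cnt_many (get_cards[j] = card is out of range).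
def Pre_solution (cnt_sang : Int) (card_sang : List Int) (cnt_many : Int) (how_many : List Int) : Prop :=
  ∀ p ∈ how_many.zipIdx, p.1 ∈ card_sang → (p.2 : Int) < cnt_many
instance (cnt_sang : Int) (card_sang : List Int) (cnt_many : Int) (how_many : List Int) : Decidable (Pre_solution cnt_sang card_sang cnt_many how_many) := by unfold Pre_solution; infer_instance
def pvWitness_solution : Int × List Int × Int × List Int := (3, [1, 2, 2], 2, [2, 5])
def Spec_solution (cnt_sang : Int) (card_sang : List Int) (cnt_many : Int) (how_many : List Int) (out : List Int) : Prop := out = solution_alt cnt_sang card_sang cnt_many how_many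
instance (cnt_sang : Int) (card_sang : List Int) (cnt_many : Int) (how_many : List Int) (out : List Int) : Decidable (Spec_solution cnt_sang card_sang cnt_many how_many out) := by unfold Spec_solution; infer_instance

-- ===== CLAIM (what is proved, stated in full; the proofs are below) =====
def Claim_equal_solution : Prop := ∀ (cnt_sang : Int) (card_sang : List Int) (cnt_many : Int) (how_many : List Int), Dom_solution cnt_sang card_sang cnt_many how_many → Pre_solution cnt_sang card_sang cnt_many how_many → Spec_solution cnt_sang card_sang cnt_many how_many (solution cnt_sang card_sang cnt_many how_many)

-- ===== LEMMAS AND PROOFS =====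

-- the zero-initialisation fold: lookup is `some 0` on the keys, untouched elsewhere
theorem pv_get?_init (ks : List Int) (d : PySem.Dict Int Int) (v : Int) :
    (ks.foldl (fun d cards => d.insert cards 0) d).get? v
      = if v ∈ ks then some 0 else d.get? v := by
  induction ks generalizing d with
  | nil => simp
  | cons k t ih =>
    simp only [List.foldl_cons, ih, PySem.Dict.get?_insert, List.mem_cons]
    by_cases hvt : v ∈ t <;> by_cases hvk : v = k <;> simp [hvt, hvk]

-- the try/except increment fold over a dict that contains every key of the list
theorem pv_get?_incr (l : List Int) (d : PySem.Dict Int Int) (v : Int)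
    (h : ∀ i ∈ l, (d.get? i).isSome) :
    (l.foldl (fun d i => match d.get? i with
        | some c => d.insert i (c + 1)
        | none => d) d).get? v
      = match d.get? v with
        | some c => some (c + l.count v)
        | none => none := by
  induction l generalizing d with
  | nil => cases hv : d.get? v <;> simp [hv]
  | cons i t ih =>
    have hi : (d.get? i).isSome := h i (List.mem_cons_self)
    obtain ⟨c, hc⟩ := Option.isSome_iff_exists.mp hi
    have hstep : ∀ j ∈ t, (((d.insert i (c + 1)).get? j).isSome) := by
      intro j hj
      rw [PySem.Dict.get?_insert]
      split
      · simp
      · exact h j (List.mem_cons_of_mem _ hj)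
    simp only [List.foldl_cons, hc, ih _ hstep, PySem.Dict.get?_insert]
    by_cases hvi : v = i
    · subst hvi
      simp [hc]
      omega
    · simp only [if_neg hvi]
      cases hv : d.get? v with
      | none => simp
      | some c' =>
        simp [Ne.symm hvi]

-- A's dict lookup characterised: count if present, none if absent
theorem pv_dictA (s : List Int) (v : Int) :
    ((s.foldl (fun d i => match d.get? i with
        | some c => d.insert i (c + 1)
        | none => d)
      ((PySem.Set.ofList s).foldl (fun d cards => d.insert cards 0) (PySem.Dict.empty : PySem.Dict Int Int))).get? v)
      = if v ∈ s then some (s.count v : Int) else none := by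
  have h0 : ∀ w : Int, ((PySem.Set.ofList s).foldl (fun d cards => d.insert cards 0) (PySem.Dict.empty : PySem.Dict Int Int)).get? w
      = if w ∈ s then some 0 else none := by
    intro w
    rw [pv_get?_init]
    simp [PySem.Set.mem_ofList]
  rw [pv_get?_incr _ _ _ (by intro i hi; rw [h0 i]; simp [hi])]
  rw [h0 v]
  by_cases hv : v ∈ s <;> simp [hv]

-- a Pairwise-(≤) list splits at the bisect indices: count = bisectRight - bisectLeft
theorem pv_bisect_count (s : List Int) (v : Int)
    (hs : s.Pairwise (fun a b => a ≤ b)) :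
    ((PySem.List.bisectRight s v : Int) - (PySem.List.bisectLeft s v : Int)) = (s.count v : Int) := by
  obtain ⟨hbl_le, hblL, hblR⟩ := PySem.List.bisectLeft_spec s v hs
  obtain ⟨hbr_le, hbrL, hbrR⟩ := PySem.List.bisectRight_spec s v hs
  set bl := PySem.List.bisectLeft s v with hblname
  set br := PySem.List.bisectRight s v with hbrname
  have hle : bl ≤ br := by
    by_contra hlt
    push_neg at hlt
    have hbrlen : br < s.length := lt_of_lt_of_le hlt hbl_le
    have h1 := hblL br hbrlen hlt
    have h2 := hbrR br hbrlen (le_refl _)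
    omega
  have hdecomp : s = (s.take bl ++ (s.drop bl).take (br - bl)) ++ s.drop br := by
    have h1 : s.drop br = ((s.drop bl).drop (br - bl)) := by
      rw [List.drop_drop, Nat.add_sub_cancel' hle]
    rw [h1, List.append_assoc, List.take_append_drop, List.take_append_drop]
  have hc1 : (s.take bl).count v = 0 := by
    rw [List.count_eq_zero]
    intro hmem
    obtain ⟨i, hi, he⟩ := List.mem_iff_getElem.mp hmem
    have hib : i < bl ∧ i < s.length := by simpa using hi
    rw [List.getElem_take] at he
    have := hblL i hib.2 hib.1
    rw [he] at this
    exact lt_irrefl _ this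
  have hc3 : (s.drop br).count v = 0 := by
    rw [List.count_eq_zero]
    intro hmem
    obtain ⟨i, hi, he⟩ := List.mem_iff_getElem.mp hmem
    have hib : br + i < s.length := by
      have := List.length_drop (i := br) (l := s) ▸ hi
      omega
    rw [List.getElem_drop] at he
    have := hbrR (br + i) hib (Nat.le_add_right _ _)
    rw [he] at this
    exact lt_irrefl _ this
  have hall : ∀ b ∈ (s.drop bl).take (br - bl), v = b := by
    intro b hmem
    obtain ⟨i, hi, he⟩ := List.mem_iff_getElem.mp hmem
    have hib : i < br - bl ∧ bl + i < s.length := by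
      simp [List.length_take, List.length_drop] at hi
      omega
    rw [List.getElem_take, List.getElem_drop] at he
    have h1 := hblR (bl + i) hib.2 (Nat.le_add_right _ _)
    have h2 := hbrL (bl + i) hib.2 (by omega)
    rw [he] at h1 h2
    omega
  have hlenmid : ((s.drop bl).take (br - bl)).length = br - bl := by
    simp [List.length_take, List.length_drop]
    omega
  have hcount : s.count v = br - bl := by
    have h := congrArg (List.count v) hdecomp
    rw [List.count_append, List.count_append, hc1, hc3,
        List.count_eq_length.mpr hall, hlenmid] at h
    omega
  rw [hcount]
  omega

-- the two output loops agree step for step: A looks its count up in the dict,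
-- B recomputes it by binary search; per element both write the same cell or skip
theorem pv_loops (s : List Int) (hs : s.Pairwise (fun a b => a ≤ b))
    (how : List Int) (g : List Int) (j : Nat) :
    (how.foldl (fun (gj : List Int × Nat) i =>
        match (s.foldl (fun d i => match d.get? i with
            | some c => d.insert i (c + 1)
            | none => d)
          ((PySem.Set.ofList s).foldl (fun d cards => d.insert cards 0) (PySem.Dict.empty : PySem.Dict Int Int))).get? i with
        | some card => (if card ≠ 0 then gj.1.set gj.2 card else gj.1, gj.2 + 1)
        | none => (gj.1, gj.2 + 1)) (g, j)).1
    = (PySem.List.enumerate how (j : Int)).foldl (fun g jv =>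
        let cnt : Int := (PySem.List.bisectRight s jv.2 : Int) - (PySem.List.bisectLeft s jv.2 : Int)
        if cnt ≠ 0 then g.set jv.1.toNat cnt else g) g := by
  induction how generalizing g j with
  | nil => rfl
  | cons i t ih =>
    have henum : PySem.List.enumerate (i :: t) (j : Int)
        = ((j : Int), i) :: PySem.List.enumerate t ((j : Int) + 1) := rfl
    have hcast : ((j : Int) + 1) = (((j + 1 : Nat)) : Int) := by push_cast; ring
    have hcnt := pv_bisect_count s i hs
    rw [List.foldl_cons, henum, List.foldl_cons, pv_dictA s i]
    by_cases hi : i ∈ s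
    · have hc0 : s.count i ≠ 0 := by
        simp only [ne_eq, List.count_eq_zero]
        exact fun h => h hi
      have hne : ((s.count i : Int)) ≠ 0 := by exact_mod_cast hc0
      simp only [if_pos hi, hcnt, hne, ne_eq, not_false_iff, if_true]
      rw [hcast, ← ih]
      simp [hne, Int.toNat_natCast]
    · have hc0 : s.count i = 0 := List.count_eq_zero.mpr hi
      simp only [if_neg hi, hcnt, hc0]
      rw [hcast, ← ih]
      simp

-- ===== VERDICT (by name: the statement is the Claim_ definition above) =====
theorem solution_spec : Claim_equal_solution := by
  intro cnt_sang card_sang cnt_many how_many _hdom _hpre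
  unfold Spec_solution solution solution_alt
  have := pv_loops (PySem.List.sorted card_sang (fun x => x) false)
    (by simpa using PySem.List.sorted_pairwise card_sang (fun x => x))
    how_many (List.replicate cnt_many.toNat 0) 0
  simpa using this
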